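-- pv_equiv track=rewrite | github.com/tejaswi0905/DSA-Python | Code_forces_sparring/math_constructive/insert_zero_and_invert_prefix.py | solve
-- ===== SOURCE A (Python) =====
-- def solve(n, a):
--     ans = []
--     i = 0
--     while i < n:
--         j = i
--         while (j < n and a[j] == 1):
--             j += 1
--         if j == n:
--             return []
--         ans.append(j)
--         for _ in range(i, j):
--             ans.append(0)
--         i = j + 1
--     return list(reversed(a))
-- ===== SOURCE B (Python) =====
-- def solve(n, a):
--     # A's scanning loop only detects whether a[n-1] == 1 (ans is never used):
--     # direct guard plus reversal.
--     if n > 0 and a[n - 1] == 1: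
--         return []
--     return list(reversed(a))
-- ===== Notes on version B (the rewrite author's own statement) =====
-- stated objective: simpler
-- what changed: Replaced A's nested scanning loops (which build a dead 'ans' list and only ever detect a trailing 1) by a direct check of a[n-1] plus a single reversal.
import Mathlib
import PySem

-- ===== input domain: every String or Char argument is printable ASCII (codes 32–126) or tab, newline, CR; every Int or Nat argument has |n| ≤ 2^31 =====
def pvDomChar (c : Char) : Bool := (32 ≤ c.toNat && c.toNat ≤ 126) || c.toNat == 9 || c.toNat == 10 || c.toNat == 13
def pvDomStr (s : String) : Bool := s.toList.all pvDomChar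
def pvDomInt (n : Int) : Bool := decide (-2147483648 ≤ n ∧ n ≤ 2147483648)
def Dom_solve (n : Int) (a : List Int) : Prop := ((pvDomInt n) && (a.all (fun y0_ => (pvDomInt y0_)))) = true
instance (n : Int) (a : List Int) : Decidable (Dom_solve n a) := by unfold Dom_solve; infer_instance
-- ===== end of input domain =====

-- B replaces A's nested scanning loops by a direct last-element check plus one reversal (simpler).
-- ===== PORT A =====
-- inner 'while (j < n and a[j] == 1): j += 1'
def solveInner (N : Nat) (a : List Int) (j : Nat) : Nat :=
  if j < N ∧ a.getD j 0 = 1 then solveInner N a (j + 1) else j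
termination_by N - j
decreasing_by omega

theorem solveInner_ge (N : Nat) (a : List Int) (j : Nat) : j ≤ solveInner N a j := by
  unfold solveInner
  split
  · exact Nat.le_trans (Nat.le_succ j) (solveInner_ge N a (j + 1))
  · exact Nat.le_refl j
termination_by N - j
decreasing_by omega

-- outer 'while i < n' loop; 'ans' is carried exactly as in A even though it is never returned
def solveOuter (N : Nat) (a : List Int) (i : Nat) (ans : List Int) : List Int :=
  if hi : i < N then
    if solveInner N a i = N then []
    else solveOuter N a (solveInner N a i + 1)
      (ans ++ [(solveInner N a i : Int)] ++ List.replicate (solveInner N a i - i) 0)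
  else a.reverse
termination_by N - i
decreasing_by
  have h1 := solveInner_ge N a i
  omega

def solve (n : Int) (a : List Int) : List Int := solveOuter n.toNat a 0 []

-- ===== PORT B =====
def solve_alt (n : Int) (a : List Int) : List Int :=
  if 0 < n ∧ a.getD (n - 1).toNat 0 = 1 then [] else a.reverse

-- ===== PRECONDITION & SPEC =====
-- Pre_ excludes exactly n > len(a), where Python A raises IndexError (and B does too).
def Pre_solve (n : Int) (a : List Int) : Prop := n ≤ (a.length : Int)
instance (n : Int) (a : List Int) : Decidable (Pre_solve n a) := by unfold Pre_solve; infer_instance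
def pvWitness_solve : Int × List Int := (3, [1, 0, 2])
def Spec_solve (n : Int) (a : List Int) (out : List Int) : Prop := out = solve_alt n a
instance (n : Int) (a : List Int) (out : List Int) : Decidable (Spec_solve n a out) := by unfold Spec_solve; infer_instance

-- ===== CLAIM (what is proved, stated in full; the proofs are below) =====
def Claim_equal_solve : Prop := ∀ (n : Int) (a : List Int), Dom_solve n a → Pre_solve n a → Spec_solve n a (solve n a)

-- ===== LEMMAS AND PROOFS =====
theorem solveInner_le (N : Nat) (a : List Int) (j : Nat) (h : j ≤ N) : solveInner N a j ≤ N := by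
  unfold solveInner
  split
  · next hc => exact solveInner_le N a (j + 1) hc.1
  · exact h
termination_by N - j
decreasing_by omega

theorem solveInner_ones (N : Nat) (a : List Int) (j k : Nat)
    (hjk : j ≤ k) (hk : k < solveInner N a j) : a.getD k 0 = 1 := by
  unfold solveInner at hk
  split at hk
  · next hc =>
    rcases Nat.eq_or_lt_of_le hjk with h | h
    · exact h ▸ hc.2
    · exact solveInner_ones N a (j + 1) k h hk
  · omega
termination_by N - j
decreasing_by omega

theorem solveInner_stop (N : Nat) (a : List Int) (j : Nat) :
    ¬ (solveInner N a j < N ∧ a.getD (solveInner N a j) 0 = 1) := by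
  unfold solveInner
  split
  · exact solveInner_stop N a (j + 1)
  · next h => simpa [solveInner] using h
termination_by N - j
decreasing_by omega

theorem solveOuter_eq (N : Nat) (a : List Int) (i : Nat) (ans : List Int) (hi : i ≤ N) :
    solveOuter N a i ans =
      if i < N ∧ a.getD (N - 1) 0 = 1 then [] else a.reverse := by
  rw [solveOuter]
  by_cases h : i < N
  · rw [dif_pos h]
    have hji := solveInner_ge N a i
    have hjN := solveInner_le N a i (Nat.le_of_lt h)
    by_cases hje : solveInner N a i = N
    · have hone : a.getD (N - 1) 0 = 1 :=
        solveInner_ones N a i (N - 1) (by omega) (by omega)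
      rw [if_pos hje, if_pos ⟨h, hone⟩]
    · have hjlt : solveInner N a i < N := by omega
      have hstop := solveInner_stop N a i
      rw [if_neg hje, solveOuter_eq N a (solveInner N a i + 1) _ (by omega)]
      by_cases hone : a.getD (N - 1) 0 = 1
      · have hlt : solveInner N a i + 1 < N := by
          by_contra h'
          have he : solveInner N a i = N - 1 := by omega
          exact hstop ⟨hjlt, by rw [he]; exact hone⟩
        rw [if_pos ⟨hlt, hone⟩, if_pos ⟨h, hone⟩]
      · rw [if_neg (fun hc => hone hc.2), if_neg (fun hc => hone hc.2)]
  · rw [dif_neg h, if_neg (fun hc => h hc.1)]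
termination_by N - i
decreasing_by
  have h1 := solveInner_ge N a i
  omega

-- ===== VERDICT (by name: the statement is the Claim_ definition above) =====
theorem solve_spec : Claim_equal_solve := by
  intro n a _ _
  unfold Spec_solve solve solve_alt
  rw [solveOuter_eq n.toNat a 0 [] (Nat.zero_le _)]
  by_cases hn : 0 < n
  · have he : (n - 1).toNat = n.toNat - 1 := by omega
    have h0 : 0 < n.toNat := by omega
    rw [he]
    by_cases hone : a.getD (n.toNat - 1) 0 = 1
    · rw [if_pos ⟨h0, hone⟩, if_pos ⟨hn, hone⟩]
    · rw [if_neg (fun hc => hone hc.2), if_neg (fun hc => hone hc.2)]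
  · have h0 : ¬ 0 < n.toNat := by omega
    rw [if_neg (fun hc => h0 hc.1), if_neg (fun hc => hn hc.1)]
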